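-- pv_equiv track=rewrite | github.com/Etienne-bdt/AOC25 | d10/main.py | solve_bfs
-- ===== SOURCE A (Python) =====
-- from collections import deque
--
-- def solve_bfs(goal, buttons):
--     """Solve using BFS to find minimum button presses."""
--     q = deque([(0, 0)])
--     vis = {0}
--     while q:
--         curr, steps = q.popleft()
--         if curr == goal:
--             return steps
--         for b in buttons:
--             nxt = curr ^ b
--             if nxt not in vis:
--                 vis.add(nxt)
--                 q.append((nxt, steps + 1))
--     return 0
-- ===== SOURCE B (Python) =====
-- def solve_bfs(goal, buttons):
--     """Queue-free fixpoint solver: repeatedly sweep a distance table until no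
--     new state appears, then look the goal up (0 if absent)."""
--     dist = {0: 0}
--     changed = True
--     while changed:
--         changed = False
--         for s, d in list(dist.items()):
--             for b in buttons:
--                 t = s ^ b
--                 if t not in dist:
--                     dist[t] = d + 1
--                     changed = True
--     return dist.get(goal, 0)
-- ===== Notes on version B (the rewrite author's own statement) =====
-- stated objective: alternative
-- what changed: Replaces the BFS deque-plus-visited-set search by a queue-free Bellman-Ford-style fixpoint: a single distance table is repeatedly swept in full, adding each newly reachable state with distance d+1, until a whole sweep changes nothing, and the answer is a final table lookup with default 0.
import Mathlib
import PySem

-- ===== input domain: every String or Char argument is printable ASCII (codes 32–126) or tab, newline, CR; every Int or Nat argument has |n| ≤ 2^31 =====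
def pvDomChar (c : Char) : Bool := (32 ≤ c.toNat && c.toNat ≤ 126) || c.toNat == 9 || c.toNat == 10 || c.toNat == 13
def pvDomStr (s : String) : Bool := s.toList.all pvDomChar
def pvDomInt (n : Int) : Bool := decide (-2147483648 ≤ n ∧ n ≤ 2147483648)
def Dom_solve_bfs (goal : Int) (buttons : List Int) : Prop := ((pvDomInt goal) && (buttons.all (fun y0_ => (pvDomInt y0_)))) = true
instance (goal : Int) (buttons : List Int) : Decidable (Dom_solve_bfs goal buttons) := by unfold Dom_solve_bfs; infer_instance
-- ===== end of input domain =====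

-- B replaces A's BFS (deque of (state, steps) pairs plus a visited set) by a queue-free
-- fixpoint solver: one distance table is swept in full, over and over, adding each newly
-- reachable state at distance d+1, until a sweep changes nothing; the answer is a final
-- table lookup with default 0.  Alternative decomposition; B does more work per level.
-- Both loop ports carry a fuel guard of 2^33 + 2, proved never exhausted on Dom (all
-- reachable states lie in [-2^32, 2^32), so at most 2^33 distinct states ever appear).

-- ===== PORT A =====
-- inner 'for b in buttons' loop of A: appends (curr ^ b, steps + 1) to the queue and adds it to vis when unseen
def pvInnerA (steps curr : Int) (buttons : List Int)
    (st : List (Int × Int) × PySem.Set Int) : List (Int × Int) × PySem.Set Int :=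
  buttons.foldl (fun st b =>
    let nxt := PySem.Int.bxor curr b
    if nxt ∈ st.2 then st else (st.1 ++ [(nxt, steps + 1)], PySem.Set.add st.2 nxt)) st

-- the 'while q' loop of A (fuel is a totality guard only; never exhausted on Dom, see pvMain)
def pvLoopA (goal : Int) (buttons : List Int) : Nat → List (Int × Int) → PySem.Set Int → Int
  | 0, _, _ => 0
  | f + 1, q, vis =>
    match q with
    | [] => 0
    | (curr, steps) :: q =>
      if curr = goal then steps
      else
        let st := pvInnerA steps curr buttons (q, vis)
        pvLoopA goal buttons f st.1 st.2

def solve_bfs (goal : Int) (buttons : List Int) : Int :=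
  pvLoopA goal buttons (2 ^ 33 + 2) [(0, 0)] (PySem.Set.ofList [0])

-- ===== PORT B =====
-- inner 'for b in buttons' loop of B: inserts t = s ^ b at distance d + 1 when absent, raising the changed flag
def pvInnerC (s d : Int) (buttons : List Int)
    (st : PySem.Dict Int Int × Bool) : PySem.Dict Int Int × Bool :=
  buttons.foldl (fun st b =>
    let t := PySem.Int.bxor s b
    if st.1.contains t then st else (st.1.insert t (d + 1), true)) st

-- one full sweep: 'for s, d in list(dist.items())' over the round-start snapshot
def pvSweepC (buttons : List Int) (dist : PySem.Dict Int Int) : PySem.Dict Int Int × Bool :=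
  dist.items.foldl (fun st p => pvInnerC p.1 p.2 buttons st) (dist, false)

-- the 'while changed' loop of B (same fuel guard; on exit, 'return dist.get(goal, 0)')
def pvLoopC (goal : Int) (buttons : List Int) : Nat → PySem.Dict Int Int → Int
  | 0, dist => dist.getD goal 0
  | f + 1, dist =>
    let st := pvSweepC buttons dist
    if st.2 then pvLoopC goal buttons f st.1 else st.1.getD goal 0

def solve_bfs_alt (goal : Int) (buttons : List Int) : Int :=
  pvLoopC goal buttons (2 ^ 33 + 2) (PySem.Dict.ofList [(0, 0)])

-- ===== PRECONDITION & SPEC =====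
def Spec_solve_bfs (goal : Int) (buttons : List Int) (out : Int) : Prop := out = solve_bfs_alt goal buttons
instance (goal : Int) (buttons : List Int) (out : Int) : Decidable (Spec_solve_bfs goal buttons out) := by unfold Spec_solve_bfs; infer_instance

-- ===== CLAIM (what is proved, stated in full; the proofs are below) =====
def Claim_equal_solve_bfs : Prop := ∀ (goal : Int) (buttons : List Int), Dom_solve_bfs goal buttons → Spec_solve_bfs goal buttons (solve_bfs goal buttons)

-- ===== LEMMAS AND PROOFS =====

-- every state the search touches stays in the 33-bit two's-complement window
def pvInS (x : Int) : Prop := -4294967296 ≤ x ∧ x < 4294967296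

theorem pvInS_bxor {a b : Int} (ha : pvInS a) (hb : pvInS b) : pvInS (PySem.Int.bxor a b) := by
  obtain ⟨ha1, ha2⟩ := ha; obtain ⟨hb1, hb2⟩ := hb
  unfold PySem.Int.bxor pvInS
  split_ifs with h1 h2 h2
  · have hx : a.toNat ^^^ b.toNat < 2 ^ 32 := Nat.xor_lt_two_pow (by omega) (by omega)
    omega
  · have hx : a.toNat ^^^ (-b - 1).toNat < 2 ^ 32 := Nat.xor_lt_two_pow (by omega) (by omega)
    omega
  · have hx : (-a - 1).toNat ^^^ b.toNat < 2 ^ 32 := Nat.xor_lt_two_pow (by omega) (by omega)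
    omega
  · have hx : (-a - 1).toNat ^^^ (-b - 1).toNat < 2 ^ 32 := Nat.xor_lt_two_pow (by omega) (by omega)
    omega

theorem pvCard (vis : List Int) (hnd : vis.Nodup) (hS : ∀ v ∈ vis, pvInS v) :
    vis.length ≤ 8589934592 := by
  have hsub : vis.toFinset ⊆ Finset.Icc (-4294967296 : Int) 4294967295 := by
    intro v hv
    simp only [List.mem_toFinset] at hv
    have := hS v hv
    simp only [Finset.mem_Icc]
    unfold pvInS at this; omega
  have hcard := Finset.card_le_card hsub
  rw [List.toFinset_card_of_nodup hnd, Int.card_Icc] at hcard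
  omega

-- proof-only helper: level-synchronous BFS, the common intermediate between A and B
def pvInnerB (s : Int) (buttons : List Int)
    (st : List Int × PySem.Set Int) : List Int × PySem.Set Int :=
  buttons.foldl (fun st b =>
    let t := PySem.Int.bxor s b
    if t ∈ st.2 then st else (st.1 ++ [t], PySem.Set.add st.2 t)) st

def pvExpandB (buttons : List Int) (frontier : List Int) (vis : PySem.Set Int) :
    List Int × PySem.Set Int :=
  frontier.foldl (fun st s => pvInnerB s buttons st) ([], vis)

def pvLoopB (goal : Int) (buttons : List Int) : Nat → List Int → PySem.Set Int → Int → Int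
  | 0, _, _, _ => 0
  | f + 1, frontier, vis, depth =>
    if frontier.isEmpty then 0
    else if goal ∈ frontier then depth
    else
      let st := pvExpandB buttons frontier vis
      pvLoopB goal buttons f st.1 st.2 (depth + 1)

theorem pvInnerA_nil (steps curr : Int) (st : List (Int × Int) × PySem.Set Int) :
    pvInnerA steps curr [] st = st := rfl
theorem pvInnerA_cons (steps curr b : Int) (bs : List Int) (st : List (Int × Int) × PySem.Set Int) :
    pvInnerA steps curr (b :: bs) st
      = pvInnerA steps curr bs
          (if PySem.Int.bxor curr b ∈ st.2 then st
           else (st.1 ++ [(PySem.Int.bxor curr b, steps + 1)], PySem.Set.add st.2 (PySem.Int.bxor curr b))) := rfl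
theorem pvInnerB_nil (s : Int) (st : List Int × PySem.Set Int) :
    pvInnerB s [] st = st := rfl
theorem pvInnerB_cons (s b : Int) (bs : List Int) (st : List Int × PySem.Set Int) :
    pvInnerB s (b :: bs) st
      = pvInnerB s bs
          (if PySem.Int.bxor s b ∈ st.2 then st
           else (st.1 ++ [PySem.Int.bxor s b], PySem.Set.add st.2 (PySem.Int.bxor s b))) := rfl

theorem pvInnerA_acc (steps curr : Int) (bs : List Int) (q : List (Int × Int)) (vis : PySem.Set Int) :
    pvInnerA steps curr bs (q, vis)
      = (q ++ (pvInnerA steps curr bs ([], vis)).1, (pvInnerA steps curr bs ([], vis)).2) := by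
  induction bs generalizing q vis with
  | nil => simp [pvInnerA_nil]
  | cons b bs ih =>
    simp only [pvInnerA_cons]
    by_cases h : PySem.Int.bxor curr b ∈ vis
    · simp only [if_pos h]
      exact ih q vis
    · simp only [if_neg h, List.nil_append]
      rw [ih (q ++ [(PySem.Int.bxor curr b, steps + 1)]) (PySem.Set.add vis (PySem.Int.bxor curr b)),
          ih ([(PySem.Int.bxor curr b, steps + 1)]) (PySem.Set.add vis (PySem.Int.bxor curr b))]
      simp

theorem pvInnerB_acc (s : Int) (bs : List Int) (acc : List Int) (vis : PySem.Set Int) :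
    pvInnerB s bs (acc, vis)
      = (acc ++ (pvInnerB s bs ([], vis)).1, (pvInnerB s bs ([], vis)).2) := by
  induction bs generalizing acc vis with
  | nil => simp [pvInnerB_nil]
  | cons b bs ih =>
    simp only [pvInnerB_cons]
    by_cases h : PySem.Int.bxor s b ∈ vis
    · simp only [if_pos h]
      exact ih acc vis
    · simp only [if_neg h, List.nil_append]
      rw [ih (acc ++ [PySem.Int.bxor s b]) (PySem.Set.add vis (PySem.Int.bxor s b)),
          ih ([PySem.Int.bxor s b]) (PySem.Set.add vis (PySem.Int.bxor s b))]
      simp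

theorem pvInnerAB (steps s : Int) (bs : List Int) (vis : PySem.Set Int) :
    pvInnerA steps s bs ([], vis)
      = ((pvInnerB s bs ([], vis)).1.map (fun t => (t, steps + 1)), (pvInnerB s bs ([], vis)).2) := by
  induction bs generalizing vis with
  | nil => simp [pvInnerA_nil, pvInnerB_nil]
  | cons b bs ih =>
    simp only [pvInnerA_cons, pvInnerB_cons]
    by_cases h : PySem.Int.bxor s b ∈ vis
    · simp only [if_pos h]
      exact ih vis
    · simp only [if_neg h]
      rw [pvInnerA_acc, pvInnerB_acc, ih (PySem.Set.add vis (PySem.Int.bxor s b))]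
      simp

theorem pvInnerB_shape (s : Int) (bs : List Int) (acc : List Int) (vis : PySem.Set Int) :
    ∃ k, pvInnerB s bs (acc, vis) = (acc ++ k, vis ++ k)
      ∧ ∀ t ∈ k, ∃ b ∈ bs, t = PySem.Int.bxor s b := by
  induction bs generalizing acc vis with
  | nil => exact ⟨[], by simp [pvInnerB_nil], by simp⟩
  | cons b bs ih =>
    simp only [pvInnerB_cons]
    by_cases h : PySem.Int.bxor s b ∈ vis
    · simp only [if_pos h]
      obtain ⟨k, hk, hmem⟩ := ih acc vis
      exact ⟨k, hk, fun t ht => by obtain ⟨b', hb', ht'⟩ := hmem t ht; exact ⟨b', by simp [hb'], ht'⟩⟩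
    · simp only [if_neg h]
      have hadd : PySem.Set.add vis (PySem.Int.bxor s b) = vis ++ [PySem.Int.bxor s b] := by
        simp [PySem.Set.add, h]
      rw [hadd]
      obtain ⟨k, hk, hmem⟩ := ih (acc ++ [PySem.Int.bxor s b]) (vis ++ [PySem.Int.bxor s b])
      refine ⟨PySem.Int.bxor s b :: k, by simpa using hk, ?_⟩
      intro t ht
      rcases List.mem_cons.mp ht with h1 | h1
      · exact ⟨b, by simp, h1⟩
      · obtain ⟨b', hb', ht'⟩ := hmem t h1; exact ⟨b', by simp [hb'], ht'⟩

theorem pvInnerB_nodup (s : Int) (bs : List Int) (acc : List Int) (vis : PySem.Set Int)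
    (h : vis.Nodup) : ((pvInnerB s bs (acc, vis)).2 : List Int).Nodup := by
  induction bs generalizing acc vis with
  | nil => simpa [pvInnerB_nil] using h
  | cons b bs ih =>
    simp only [pvInnerB_cons]
    by_cases hm : PySem.Int.bxor s b ∈ vis
    · simpa [if_pos hm] using ih acc vis h
    · simpa [if_neg hm] using
        ih (acc ++ [PySem.Int.bxor s b]) (PySem.Set.add vis (PySem.Int.bxor s b))
          (PySem.Set.nodup_add vis _ h)

theorem pvExpand_shape (bs fr : List Int) (acc : List Int) (vis : PySem.Set Int) :
    ∃ k, fr.foldl (fun st s => pvInnerB s bs st) (acc, vis) = (acc ++ k, vis ++ k)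
      ∧ ∀ t ∈ k, ∃ s ∈ fr, ∃ b ∈ bs, t = PySem.Int.bxor s b := by
  induction fr generalizing acc vis with
  | nil => exact ⟨[], by simp, by simp⟩
  | cons s fr ih =>
    simp only [List.foldl_cons]
    obtain ⟨k1, hk1, hm1⟩ := pvInnerB_shape s bs acc vis
    rw [hk1]
    obtain ⟨k2, hk2, hm2⟩ := ih (acc ++ k1) (vis ++ k1)
    refine ⟨k1 ++ k2, by simpa [List.append_assoc] using hk2, ?_⟩
    intro t ht
    rcases List.mem_append.mp ht with h1 | h1
    · obtain ⟨b, hb, ht'⟩ := hm1 t h1; exact ⟨s, by simp, b, hb, ht'⟩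
    · obtain ⟨s', hs', b, hb, ht'⟩ := hm2 t h1; exact ⟨s', by simp [hs'], b, hb, ht'⟩

theorem pvExpand_nodup (bs fr : List Int) (acc : List Int) (vis : PySem.Set Int)
    (h : vis.Nodup) : ((fr.foldl (fun st s => pvInnerB s bs st) (acc, vis)).2 : List Int).Nodup := by
  induction fr generalizing acc vis with
  | nil => simpa using h
  | cons s fr ih =>
    simp only [List.foldl_cons]
    have h1 := pvInnerB_nodup s bs acc vis h
    obtain ⟨k1, hk1, -⟩ := pvInnerB_shape s bs acc vis
    rw [hk1] at h1 ⊢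
    exact ih (acc ++ k1) (vis ++ k1) h1

theorem pvLoopA_nil (goal : Int) (bs : List Int) (f : Nat) (vis : PySem.Set Int) :
    pvLoopA goal bs f [] vis = 0 := by cases f <;> rfl

theorem pvLoopB_nil (goal : Int) (bs : List Int) (f : Nat) (vis : PySem.Set Int) (d : Int) :
    pvLoopB goal bs f [] vis d = 0 := by cases f <;> rfl

theorem pvLevel (goal : Int) (bs : List Int) (l1 l2 : List Int) (vis : PySem.Set Int)
    (fA : Nat) (d : Int) :
    pvLoopA goal bs (fA + l1.length)
        (l1.map (fun s => (s, d)) ++ l2.map (fun s => (s, d + 1))) vis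
      = if goal ∈ l1 then d
        else
          pvLoopA goal bs fA
            ((l1.foldl (fun st s => pvInnerB s bs st) (l2, vis)).1.map (fun s => (s, d + 1)))
            (l1.foldl (fun st s => pvInnerB s bs st) (l2, vis)).2 := by
  induction l1 generalizing l2 vis with
  | nil => simp
  | cons s rest ih =>
    have hfuel : fA + (s :: rest).length = (fA + rest.length) + 1 := by
      simp only [List.length_cons]; omega
    rw [hfuel]
    simp only [List.map_cons, List.cons_append, pvLoopA]
    by_cases hs : s = goal
    · simp [hs]
    · simp only [if_neg hs]
      rw [pvInnerA_acc, pvInnerAB]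
      have hmap : (rest.map (fun s => (s, d)) ++ l2.map (fun s => (s, d + 1)))
            ++ ((pvInnerB s bs ([], vis)).1.map (fun t => (t, d + 1)))
          = rest.map (fun s => (s, d))
            ++ (l2 ++ (pvInnerB s bs ([], vis)).1).map (fun s => (s, d + 1)) := by
        simp [List.map_append]
      rw [hmap, ih (l2 ++ (pvInnerB s bs ([], vis)).1) (pvInnerB s bs ([], vis)).2,
          List.foldl_cons, pvInnerB_acc s bs l2 vis]
      have hmem : (goal ∈ s :: rest) ↔ (goal ∈ rest) := by
        simp only [List.mem_cons, or_iff_right_iff_imp]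
        intro h; exact absurd h.symm hs
      by_cases hg : goal ∈ rest
      · rw [if_pos hg, if_pos (hmem.mpr hg)]
      · rw [if_neg hg, if_neg (fun h => hg (hmem.mp h))]

theorem pvMain (goal : Int) (bs : List Int) (hbs : ∀ b ∈ bs, pvInS b) :
    ∀ (fB : Nat) (fr : List Int) (vis : PySem.Set Int) (depth : Int) (fA : Nat),
    vis.Nodup → (∀ v ∈ vis, pvInS v) → fr ⊆ vis →
    vis.length ≤ 8589934592 →
    (8589934592 - vis.length) + 2 ≤ fB →
    fr.length + (8589934592 - vis.length) + 1 ≤ fA →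
    pvLoopA goal bs fA (fr.map (fun s => (s, depth))) vis = pvLoopB goal bs fB fr vis depth := by
  intro fB
  induction fB with
  | zero => intro fr vis depth fA _ _ _ _ hfB _; omega
  | succ f ih =>
    intro fr vis depth fA hnd hvis hsub hlen hfB hfA
    match fr, hsub, hfA with
    | [], hsub, hfA => simp [pvLoopA_nil, pvLoopB_nil]
    | s :: fr', hsub, hfA =>
      have hne : (s :: fr').isEmpty = false := by simp
      obtain ⟨fA', rfl⟩ : ∃ fA', fA = fA' + (s :: fr').length := by
        refine ⟨fA - (s :: fr').length, ?_⟩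
        have : (s :: fr').length ≤ fA := by omega
        omega
      have hlev := pvLevel goal bs (s :: fr') [] vis fA' depth
      simp only [List.map_nil, List.append_nil] at hlev
      rw [hlev]
      simp only [pvLoopB, hne, Bool.false_eq_true, if_false, pvExpandB]
      by_cases hg : goal ∈ s :: fr'
      · rw [if_pos hg, if_pos hg]
      · rw [if_neg hg, if_neg hg]
        obtain ⟨k, hk, hmem⟩ := pvExpand_shape bs (s :: fr') [] vis
        rw [hk]
        simp only [List.nil_append]
        match k, hk, hmem with
        | [], hk, hmem => simp [pvLoopA_nil, pvLoopB_nil]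
        | t :: k', hk, hmem =>
          have hnd' : (vis ++ t :: k').Nodup := by
            have := pvExpand_nodup bs (s :: fr') [] vis hnd
            rwa [hk] at this
          have hvis' : ∀ v ∈ vis ++ t :: k', pvInS v := by
            intro v hv
            rcases List.mem_append.mp hv with h1 | h1
            · exact hvis v h1
            · obtain ⟨s', hs', b, hb, rfl⟩ := hmem v h1
              exact pvInS_bxor (hvis s' (hsub hs')) (hbs b hb)
          have hlen' : (vis ++ t :: k').length ≤ 8589934592 := pvCard _ hnd' hvis'
          have hlapp : (vis ++ t :: k').length = vis.length + (t :: k').length :=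
            List.length_append ..
          have hkpos : 1 ≤ (t :: k').length := by simp
          exact ih (t :: k') (vis ++ t :: k') (depth + 1) fA'
            hnd' hvis' (by intro x hx; exact List.mem_append.mpr (Or.inr hx))
            hlen' (by omega) (by simp only [List.length_cons] at *; omega)

-- ========== new lemmas: level-synchronous BFS (pvLoopB) = fixpoint sweeps (pvLoopC) ==========

theorem pvIsEmpty_append (l1 l2 : List Int) : (l1 ++ l2).isEmpty = (l1.isEmpty && l2.isEmpty) := by
  cases l1 <;> simp

theorem pvMk_insert_fresh (D : List (Int × Int)) (t v : Int)
    (h : ¬ t ∈ D.map Prod.fst) :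
    (PySem.Dict.mk D).insert t v = PySem.Dict.mk (D ++ [(t, v)]) := by
  apply PySem.Dict.ext
  rw [PySem.Dict.items_insert_of_not_contains]
  rw [PySem.Dict.contains_eq_decide_mem_keys]
  simpa [PySem.Dict.keys] using h

theorem pvMk_contains (D : List (Int × Int)) (t : Int) :
    (PySem.Dict.mk D).contains t = decide (t ∈ D.map Prod.fst) := by
  rw [PySem.Dict.contains_eq_decide_mem_keys]
  simp [PySem.Dict.keys]

theorem pvInnerC_nil (s d : Int) (st : PySem.Dict Int Int × Bool) :
    pvInnerC s d [] st = st := rfl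
theorem pvInnerC_cons (s d b : Int) (bs : List Int) (st : PySem.Dict Int Int × Bool) :
    pvInnerC s d (b :: bs) st
      = pvInnerC s d bs
          (if st.1.contains (PySem.Int.bxor s b) then st
           else (st.1.insert (PySem.Int.bxor s b) (d + 1), true)) := rfl

-- pvInnerC on a dict with key list D simulates pvInnerB on the key set
theorem pvInnerCB (s d : Int) (bs : List Int) (D : List (Int × Int)) (c : Bool) :
    pvInnerC s d bs (PySem.Dict.mk D, c)
      = (PySem.Dict.mk (D ++ ((pvInnerB s bs ([], D.map Prod.fst)).1).map (fun t => (t, d + 1))),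
         c || !(pvInnerB s bs ([], D.map Prod.fst)).1.isEmpty) := by
  induction bs generalizing D c with
  | nil => simp [pvInnerC_nil, pvInnerB_nil]
  | cons b bs ih =>
    simp only [pvInnerC_cons, pvInnerB_cons, pvMk_contains]
    by_cases h : PySem.Int.bxor s b ∈ D.map Prod.fst
    · simp only [decide_eq_true_eq, if_pos h]
      exact ih D c
    · simp only [decide_eq_true_eq, if_neg h, List.nil_append]
      have hadd : PySem.Set.add (D.map Prod.fst) (PySem.Int.bxor s b)
          = D.map Prod.fst ++ [PySem.Int.bxor s b] := by
        simp [PySem.Set.add, h]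
      rw [pvMk_insert_fresh D _ _ h, hadd]
      have hkeys : (D ++ [(PySem.Int.bxor s b, d + 1)]).map Prod.fst
          = D.map Prod.fst ++ [PySem.Int.bxor s b] := by simp
      rw [ih (D ++ [(PySem.Int.bxor s b, d + 1)]) true, hkeys,
          pvInnerB_acc s bs [PySem.Int.bxor s b] (D.map Prod.fst ++ [PySem.Int.bxor s b])]
      simp

-- a state all of whose neighbours are present changes nothing
theorem pvInnerC_noop (s d : Int) (bs : List Int) (st : PySem.Dict Int Int × Bool)
    (h : ∀ b ∈ bs, st.1.contains (PySem.Int.bxor s b) = true) :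
    pvInnerC s d bs st = st := by
  induction bs with
  | nil => rfl
  | cons b bs ih =>
    rw [pvInnerC_cons, if_pos (h b (by simp))]
    exact ih (fun b' hb' => h b' (by simp [hb']))

-- sweeping an already-expanded prefix changes nothing
theorem pvSweep_closed (bs : List Int) (P : List (Int × Int)) (st : PySem.Dict Int Int × Bool)
    (h : ∀ p ∈ P, ∀ b ∈ bs, st.1.contains (PySem.Int.bxor p.1 b) = true) :
    P.foldl (fun st p => pvInnerC p.1 p.2 bs st) st = st := by
  induction P with
  | nil => rfl
  | cons p P ih =>
    rw [List.foldl_cons, pvInnerC_noop p.1 p.2 bs st (h p (by simp))]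
    exact ih (fun p' hp' => h p' (by simp [hp']))

-- accumulator lemma for the set-side frontier fold
theorem pvFoldB_acc (bs F : List Int) (acc : List Int) (vis : PySem.Set Int) :
    F.foldl (fun st s => pvInnerB s bs st) (acc, vis)
      = (acc ++ (F.foldl (fun st s => pvInnerB s bs st) ([], vis)).1,
         (F.foldl (fun st s => pvInnerB s bs st) ([], vis)).2) := by
  induction F generalizing acc vis with
  | nil => simp
  | cons s F ih =>
    simp only [List.foldl_cons]
    obtain ⟨k1, hk1, -⟩ := pvInnerB_shape s bs acc vis
    obtain ⟨k1', hk1', -⟩ := pvInnerB_shape s bs [] vis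
    have : k1 = k1' := by
      have h1 := pvInnerB_acc s bs acc vis
      rw [hk1, hk1'] at h1
      have := congrArg Prod.fst h1
      simpa using this
    subst this
    rw [hk1, hk1']
    rw [ih (acc ++ k1) (vis ++ k1), ih ([] ++ k1) (vis ++ k1)]
    simp

-- sweeping the frontier segment of the table is exactly a level expansion
theorem pvSweepF (bs : List Int) (F : List Int) (depth : Int) (D : List (Int × Int)) (c : Bool) :
    (F.map (fun s => (s, depth))).foldl (fun st p => pvInnerC p.1 p.2 bs st) (PySem.Dict.mk D, c)
      = (PySem.Dict.mk (D ++ ((F.foldl (fun st s => pvInnerB s bs st) ([], D.map Prod.fst)).1).map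
            (fun t => (t, depth + 1))),
         c || !(F.foldl (fun st s => pvInnerB s bs st) ([], D.map Prod.fst)).1.isEmpty) := by
  induction F generalizing D c with
  | nil => simp
  | cons s F ih =>
    simp only [List.map_cons, List.foldl_cons]
    rw [pvInnerCB s depth bs D c]
    obtain ⟨k1, hk1, -⟩ := pvInnerB_shape s bs [] (D.map Prod.fst)
    simp only [List.nil_append] at hk1
    rw [hk1]
    have hkeys : (D ++ k1.map (fun t => (t, depth + 1))).map Prod.fst
        = D.map Prod.fst ++ k1 := by
      simp [Function.comp_def]
    rw [ih (D ++ k1.map (fun t => (t, depth + 1))) _, hkeys,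
        pvFoldB_acc bs F k1 (D.map Prod.fst ++ k1)]
    simp [List.append_assoc, pvIsEmpty_append, Bool.or_assoc]

-- every neighbour of a processed state ends up in the set
theorem pvInnerB_mono (s : Int) (bs : List Int) (acc vis : List Int) (x : Int)
    (hx : x ∈ vis) : x ∈ (pvInnerB s bs (acc, vis)).2 := by
  obtain ⟨k, hk, -⟩ := pvInnerB_shape s bs acc vis
  rw [hk]; exact List.mem_append.mpr (Or.inl hx)

theorem pvInnerB_mem (s : Int) (bs : List Int) (acc vis : List Int) :
    ∀ b ∈ bs, PySem.Int.bxor s b ∈ (pvInnerB s bs (acc, vis)).2 := by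
  induction bs generalizing acc vis with
  | nil => simp
  | cons b' bs ih =>
    intro b hb
    rw [pvInnerB_cons]
    rcases List.mem_cons.mp hb with rfl | hb'
    · by_cases h : PySem.Int.bxor s b ∈ vis
      · simpa [if_pos h] using pvInnerB_mono s bs acc vis _ h
      · have hadd : PySem.Int.bxor s b ∈ PySem.Set.add vis (PySem.Int.bxor s b) := by
          simp [PySem.Set.add, h]
        simp only [if_neg h]
        exact pvInnerB_mono s bs _ _ _ hadd
    · by_cases h : PySem.Int.bxor s b' ∈ vis
      · simpa [if_pos h] using ih acc vis b hb'
      · simp only [if_neg h]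
        exact ih _ _ b hb'

theorem pvFoldB_mono (bs F : List Int) (acc vis : List Int) (x : Int)
    (hx : x ∈ vis) : x ∈ (F.foldl (fun st s => pvInnerB s bs st) (acc, vis)).2 := by
  obtain ⟨k, hk, -⟩ := pvExpand_shape bs F acc vis
  rw [hk]; exact List.mem_append.mpr (Or.inl hx)

theorem pvFoldB_mem (bs F : List Int) (vis : PySem.Set Int) :
    ∀ s ∈ F, ∀ b ∈ bs,
      PySem.Int.bxor s b ∈ (F.foldl (fun st s => pvInnerB s bs st) ([], vis)).2 := by
  induction F generalizing vis with
  | nil => simp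
  | cons s' F ih =>
    intro s hs b hb
    simp only [List.foldl_cons]
    obtain ⟨k1, hk1, -⟩ := pvInnerB_shape s' bs [] vis
    simp only [List.nil_append] at hk1
    rcases List.mem_cons.mp hs with rfl | hs'
    · have h1 := pvInnerB_mem s bs [] vis b hb
      rw [hk1] at h1 ⊢
      exact pvFoldB_mono bs F k1 (vis ++ k1) _ h1
    · rw [hk1, pvFoldB_acc bs F k1 (vis ++ k1)]
      exact ih (vis ++ k1) s hs' b hb

-- first-match lookup lemmas on literal association lists
theorem pvGet?_append_some (D E : List (Int × Int)) (g v : Int)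
    (h : (PySem.Dict.mk D).get? g = some v) :
    (PySem.Dict.mk (D ++ E)).get? g = some v := by
  revert h
  induction D with
  | nil =>
    intro h
    rw [show (PySem.Dict.mk ([] : List (Int × Int))).get? g = none from rfl] at h
    cases h
  | cons p D ih =>
    obtain ⟨a, w⟩ := p
    intro h
    rw [PySem.Dict.get?_mk_cons] at h
    rw [List.cons_append, PySem.Dict.get?_mk_cons]
    by_cases hpg : (a == g) = true
    · rwa [if_pos hpg] at h ⊢
    · rw [if_neg (by simp_all)] at h ⊢
      exact ih h

theorem pvGet?_append_right (D E : List (Int × Int)) (g : Int)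
    (h : ¬ g ∈ D.map Prod.fst) :
    (PySem.Dict.mk (D ++ E)).get? g = (PySem.Dict.mk E).get? g := by
  revert h
  induction D with
  | nil => intro h; simp
  | cons p D ih =>
    obtain ⟨a, w⟩ := p
    intro h
    simp only [List.map_cons, List.mem_cons] at h
    push Not at h
    rw [List.cons_append, PySem.Dict.get?_mk_cons, if_neg (by simp; exact fun he => h.1 he.symm)]
    exact ih h.2

theorem pvGet?_none (D : List (Int × Int)) (g : Int)
    (h : ¬ g ∈ D.map Prod.fst) :
    (PySem.Dict.mk D).get? g = none := by
  have := pvGet?_append_right D [] g h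
  rw [List.append_nil] at this
  rw [this]
  rfl

theorem pvGet?_mapF (F : List Int) (depth g : Int) (h : g ∈ F) :
    (PySem.Dict.mk (F.map (fun s => (s, depth)))).get? g = some depth := by
  revert h
  induction F with
  | nil => intro h; cases h
  | cons s F ih =>
    intro h
    rw [List.map_cons, PySem.Dict.get?_mk_cons]
    by_cases hg : (s == g) = true
    · rw [if_pos hg]
    · rw [if_neg hg]
      rcases List.mem_cons.mp h with rfl | h'
      · simp at hg
      · exact ih h'

-- a sweep only appends to the table
theorem pvSweep_ext (bs : List Int) (snap : List (Int × Int)) (D : List (Int × Int)) (c : Bool) :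
    ∃ E, (snap.foldl (fun st p => pvInnerC p.1 p.2 bs st) (PySem.Dict.mk D, c)).1
          = PySem.Dict.mk (D ++ E) := by
  induction snap generalizing D c with
  | nil => exact ⟨[], by simp⟩
  | cons p snap ih =>
    simp only [List.foldl_cons]
    rw [pvInnerCB p.1 p.2 bs D c]
    obtain ⟨E, hE⟩ := ih (D ++ ((pvInnerB p.1 bs ([], D.map Prod.fst)).1).map (fun t => (t, p.2 + 1))) _
    refine ⟨((pvInnerB p.1 bs ([], D.map Prod.fst)).1).map (fun t => (t, p.2 + 1)) ++ E, ?_⟩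
    rw [hE, List.append_assoc]

-- once the goal is in the table, every continuation returns its (first-match) value
theorem pvLoopC_stable (goal : Int) (bs : List Int) :
    ∀ (fC : Nat) (D : List (Int × Int)) (v : Int),
    (PySem.Dict.mk D).get? goal = some v →
    pvLoopC goal bs fC (PySem.Dict.mk D) = v := by
  intro fC
  induction fC with
  | zero =>
    intro D v h
    simp only [pvLoopC]
    exact PySem.Dict.getD_of_get?_eq_some _ 0 h
  | succ f ih =>
    intro D v h
    simp only [pvLoopC, pvSweepC]
    obtain ⟨E, hE⟩ := pvSweep_ext bs (PySem.Dict.mk D).items D false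
    have hsnap : (PySem.Dict.mk D).items = D := rfl
    rw [hsnap] at hE
    have h' : (PySem.Dict.mk (D ++ E)).get? goal = some v := pvGet?_append_some D E goal v h
    cases hflag : (D.foldl (fun st p => pvInnerC p.1 p.2 bs st) (PySem.Dict.mk D, false)).2
    · simp only [hE, Bool.false_eq_true, if_false]
      exact PySem.Dict.getD_of_get?_eq_some _ 0 h'
    · simp only [hE, if_true]
      exact ih (D ++ E) v h'

-- main bridge: level-synchronous BFS equals the sweep-to-fixpoint loop
theorem pvBC (goal : Int) (bs : List Int) (hbs : ∀ b ∈ bs, pvInS b) :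
    ∀ (fB : Nat) (F : List Int) (P : List (Int × Int)) (depth : Int) (fC : Nat),
    (P.map Prod.fst ++ F).Nodup →
    (∀ v ∈ P.map Prod.fst ++ F, pvInS v) →
    (∀ p ∈ P, ∀ b ∈ bs, PySem.Int.bxor p.1 b ∈ P.map Prod.fst ++ F) →
    ¬ goal ∈ P.map Prod.fst →
    (P.map Prod.fst ++ F).length ≤ 8589934592 →
    (8589934592 - (P.map Prod.fst ++ F).length) + 2 ≤ fB →
    (8589934592 - (P.map Prod.fst ++ F).length) + 2 ≤ fC →
    pvLoopB goal bs fB F (P.map Prod.fst ++ F) depth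
      = pvLoopC goal bs fC (PySem.Dict.mk (P ++ F.map (fun s => (s, depth)))) := by
  intro fB
  induction fB with
  | zero => intro F P depth fC _ _ _ _ _ hfB _; omega
  | succ f ih =>
    intro F P depth fC hnd hvis hclosed hgP hlen hfB hfC
    have hkeys : (P ++ F.map (fun s => (s, depth))).map Prod.fst = P.map Prod.fst ++ F := by
      simp [Function.comp_def]
    by_cases hgF : goal ∈ F
    · -- goal is in the frontier: B returns depth now, C will look it up at the end
      have hB : pvLoopB goal bs (f + 1) F (P.map Prod.fst ++ F) depth = depth := by
        have hne : F.isEmpty = false := by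
          cases F with | nil => cases hgF | cons a F => simp
        simp [pvLoopB, hne, hgF]
      have hget : (PySem.Dict.mk (P ++ F.map (fun s => (s, depth)))).get? goal = some depth := by
        rw [pvGet?_append_right P _ goal hgP]
        exact pvGet?_mapF F depth goal hgF
      rw [hB, pvLoopC_stable goal bs fC _ depth hget]
    · cases F with
      | nil =>
        -- empty frontier: B drains to 0; C's next sweep changes nothing and looks up 0
        rw [pvLoopB_nil]
        obtain ⟨fc, rfl⟩ : ∃ fc, fC = fc + 1 := ⟨fC - 1, by omega⟩
        simp only [pvLoopC, pvSweepC, List.map_nil, List.append_nil]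
        have hcl : ∀ p ∈ P, ∀ b ∈ bs,
            (PySem.Dict.mk P).contains (PySem.Int.bxor p.1 b) = true := by
          intro p hp b hb
          rw [pvMk_contains]
          have := hclosed p hp b hb
          rw [List.append_nil] at this
          simpa using this
        rw [pvSweep_closed bs P _ hcl]
        simp only [Bool.false_eq_true, if_false]
        have hg : ¬ goal ∈ P.map Prod.fst := hgP
        rw [PySem.Dict.getD_of_get?_eq_none _ 0 (pvGet?_none P goal hg)]
      | cons s F' =>
        -- nonempty frontier without the goal: one B level step = one C sweep
        have hne : (s :: F').isEmpty = false := by simp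
        simp only [pvLoopB, hne, Bool.false_eq_true, if_false, if_neg hgF, pvExpandB]
        obtain ⟨fc, rfl⟩ : ∃ fc, fC = fc + 1 := ⟨fC - 1, by omega⟩
        simp only [pvLoopC, pvSweepC]
        rw [List.foldl_append]
        have hcl : ∀ p ∈ P, ∀ b ∈ bs,
            (PySem.Dict.mk (P ++ (s :: F').map (fun s => (s, depth)))).contains
              (PySem.Int.bxor p.1 b) = true := by
          intro p hp b hb
          rw [pvMk_contains, hkeys]
          simpa using hclosed p hp b hb
        rw [pvSweep_closed bs P _ hcl, pvSweepF bs (s :: F') depth _ false, hkeys]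
        obtain ⟨k, hk, hmem⟩ := pvExpand_shape bs (s :: F') [] (P.map Prod.fst ++ (s :: F'))
        simp only [List.nil_append] at hk
        rw [hk]
        match k, hk, hmem with
        | [], hk, hmem =>
          simp only [List.isEmpty_nil, Bool.not_true, Bool.or_false, Bool.false_eq_true, if_false,
            List.map_nil, List.append_nil]
          have hgD : ¬ goal ∈ (P ++ (s :: F').map (fun s => (s, depth))).map Prod.fst := by
            rw [hkeys]
            intro hgg
            rcases List.mem_append.mp hgg with h1 | h1
            · exact hgP h1
            · exact hgF h1
          rw [pvLoopB_nil,
              PySem.Dict.getD_of_get?_eq_none _ 0 (pvGet?_none _ goal hgD)]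
        | t :: k', hk, hmem =>
          simp only [List.isEmpty_cons, Bool.not_false, Bool.or_true, if_true]
          -- apply the induction hypothesis with P' = the whole old table, F' = the new level
          have hnd' : ((P ++ (s :: F').map (fun s => (s, depth))).map Prod.fst ++ (t :: k')).Nodup := by
            rw [hkeys]
            have := pvExpand_nodup bs (s :: F') [] (P.map Prod.fst ++ (s :: F')) hnd
            rwa [hk] at this
          have hvis' : ∀ v ∈ (P ++ (s :: F').map (fun s => (s, depth))).map Prod.fst ++ (t :: k'),
              pvInS v := by
            rw [hkeys]
            intro v hv
            rcases List.mem_append.mp hv with h1 | h1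
            · exact hvis v h1
            · obtain ⟨s', hs', b, hb, rfl⟩ := hmem v h1
              have hs'v : s' ∈ P.map Prod.fst ++ (s :: F') := List.mem_append.mpr (Or.inr hs')
              exact pvInS_bxor (hvis s' hs'v) (hbs b hb)
          have hclosed' : ∀ p ∈ P ++ (s :: F').map (fun s => (s, depth)), ∀ b ∈ bs,
              PySem.Int.bxor p.1 b
                ∈ (P ++ (s :: F').map (fun s => (s, depth))).map Prod.fst ++ (t :: k') := by
            rw [hkeys]
            intro p hp b hb
            rcases List.mem_append.mp hp with h1 | h1
            · exact List.mem_append.mpr (Or.inl (hclosed p h1 b hb))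
            · obtain ⟨s0, hs0, rfl⟩ := List.mem_map.mp h1
              have := pvFoldB_mem bs (s :: F') (P.map Prod.fst ++ (s :: F')) s0 hs0 b hb
              rw [hk] at this
              simpa using this
          have hgP' : ¬ goal ∈ (P ++ (s :: F').map (fun s => (s, depth))).map Prod.fst := by
            rw [hkeys]
            intro hgg
            rcases List.mem_append.mp hgg with h1 | h1
            · exact hgP h1
            · exact hgF h1
          have hlen' : ((P ++ (s :: F').map (fun s => (s, depth))).map Prod.fst ++ (t :: k')).length
              ≤ 8589934592 := by
            rw [hkeys]
            exact pvCard _ (by rw [hkeys] at hnd'; exact hnd') (by rw [hkeys] at hvis'; exact hvis')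
          have hlapp : ((P.map Prod.fst ++ (s :: F')) ++ (t :: k')).length
              = (P.map Prod.fst ++ (s :: F')).length + (t :: k').length := List.length_append ..
          have hkpos : 1 ≤ (t :: k').length := by simp
          have hIH := ih (t :: k') (P ++ (s :: F').map (fun s => (s, depth))) (depth + 1) fc
            hnd' hvis' hclosed' hgP' hlen'
            (by rw [hkeys]; rw [hkeys] at hlen'; simp only [List.length_cons] at *; omega)
            (by rw [hkeys]; rw [hkeys] at hlen'; simp only [List.length_cons] at *; omega)
          rw [hkeys] at hIH
          exact hIH

-- ===== VERDICT (by name: the statement is the Claim_ definition above) =====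
theorem solve_bfs_spec : Claim_equal_solve_bfs := by
  intro goal bs hdom
  unfold Spec_solve_bfs solve_bfs solve_bfs_alt
  have hbs : ∀ b ∈ bs, pvInS b := by
    intro b hb
    simp only [Dom_solve_bfs, pvDomInt, Bool.and_eq_true, List.all_eq_true, decide_eq_true_eq] at hdom
    have := hdom.2 b hb
    unfold pvInS; omega
  have h0 : PySem.Set.ofList [(0:Int)] = [0] := rfl
  rw [h0]
  have hA := pvMain goal bs hbs (2 ^ 33 + 2) [0] [0] 0 (2 ^ 33 + 2)
    (by simp) (by intro v hv; simp at hv; subst hv; constructor <;> norm_num)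
    (by simp) (by norm_num) (by norm_num) (by norm_num)
  have hB := pvBC goal bs hbs (2 ^ 33 + 2) [0] [] 0 (2 ^ 33 + 2)
    (by simp) (by intro v hv; simp at hv; subst hv; constructor <;> norm_num)
    (by simp) (by simp) (by norm_num) (by norm_num) (by norm_num)
  have hof : PySem.Dict.ofList [((0:Int),(0:Int))] = PySem.Dict.mk [(0,0)] := by decide
  rw [hof]
  have hmap : ([0] : List Int).map (fun s => (s, (0 : Int))) = [((0:Int), (0:Int))] := by simp
  rw [hmap] at hA
  simp only [List.map_nil, List.nil_append, List.map_cons] at hB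
  exact hA.trans hB
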